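-- pv_equiv track=rewrite | github.com/mattinpgh/python-programming-zelle | 07_chapter/goldbach.py | get_addends
-- ===== SOURCE A (Python) =====
-- def get_addends(user_input, prime_list):
--     list_of_addends = []
--
--     # for x in prime_list[:(len(prime_list)//2)]:
--     for x in prime_list:
--         for y in prime_list:
--             if x + y == user_input:
--                 highest = max(x, y)
--                 lowest = min(x, y)
--                 list_of_addends.append((highest,lowest))
--
--     return list_of_addends
-- ===== SOURCE B (Python) =====
-- def get_addends(user_input, prime_list):
--     counts = {}
--     for p in prime_list:
--         counts[p] = counts.get(p, 0) + 1
--     result = []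
--     for x in prime_list:
--         y = user_input - x
--         c = counts.get(y, 0)
--         if c:
--             result.extend([(max(x, y), min(x, y))] * c)
--     return result
-- ===== Notes on version B (the rewrite author's own statement) =====
-- stated objective: faster
-- what changed: Replaced the quadratic nested scan over the prime list by a one-pass count dictionary: for each x the complement user_input-x is looked up once and the pair emitted count-many times, removing the inner loop.
import Mathlib
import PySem

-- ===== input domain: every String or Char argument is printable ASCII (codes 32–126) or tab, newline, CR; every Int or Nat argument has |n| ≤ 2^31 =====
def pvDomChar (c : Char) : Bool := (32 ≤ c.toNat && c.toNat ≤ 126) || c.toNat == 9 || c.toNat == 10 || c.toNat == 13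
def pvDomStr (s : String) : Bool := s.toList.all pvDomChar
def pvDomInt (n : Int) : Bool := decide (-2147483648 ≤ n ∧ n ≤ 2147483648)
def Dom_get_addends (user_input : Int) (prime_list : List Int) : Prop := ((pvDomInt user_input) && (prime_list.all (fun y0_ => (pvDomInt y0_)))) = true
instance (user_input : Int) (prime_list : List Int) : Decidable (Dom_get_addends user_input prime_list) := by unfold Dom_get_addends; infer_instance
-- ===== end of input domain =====

-- B replaces A's quadratic nested scan with a one-pass count dictionary + complement lookup (asymptotically faster).

-- ===== PORT A =====
def get_addends (user_input : Int) (prime_list : List Int) : List (Int × Int) :=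
  prime_list.foldl (fun acc x =>
    prime_list.foldl (fun acc2 y =>
      if x + y = user_input then acc2 ++ [(max x y, min x y)] else acc2) acc) []

-- ===== PORT B =====
def get_addends_alt (user_input : Int) (prime_list : List Int) : List (Int × Int) :=
  let counts : PySem.Dict Int Int :=
    prime_list.foldl (fun d p => d.insert p (d.getD p 0 + 1)) PySem.Dict.empty
  prime_list.foldl (fun res x =>
    let y := user_input - x
    let c := counts.getD y 0
    if c ≠ 0 then res ++ List.replicate c.toNat (max x y, min x y) else res) []

-- ===== PRECONDITION & SPEC =====
def Spec_get_addends (user_input : Int) (prime_list : List Int) (out : List (Int × Int)) : Prop := out = get_addends_alt user_input prime_list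
instance (user_input : Int) (prime_list : List Int) (out : List (Int × Int)) : Decidable (Spec_get_addends user_input prime_list out) := by unfold Spec_get_addends; infer_instance

-- ===== CLAIM (what is proved, stated in full; the proofs are below) =====
def Claim_equal_get_addends : Prop := ∀ (user_input : Int) (prime_list : List Int), Dom_get_addends user_input prime_list → Spec_get_addends user_input prime_list (get_addends user_input prime_list)

-- ===== LEMMAS AND PROOFS =====

-- A's inner loop over ys appends the constant pair once per y with x + y = n,
-- i.e. count-of-(n-x) many copies.
theorem inner_loop_eq_replicate (x n : Int) (ys : List Int) (acc : List (Int × Int)) :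
    ys.foldl (fun acc2 y => if x + y = n then acc2 ++ [(max x y, min x y)] else acc2) acc
      = acc ++ List.replicate (ys.count (n - x)) (max x (n - x), min x (n - x)) := by
  induction ys generalizing acc with
  | nil => simp
  | cons y ys ih =>
    simp only [List.foldl_cons, List.count_cons]
    by_cases h : x + y = n
    · have hy : y = n - x := by omega
      subst hy
      simp [ih, List.replicate_succ', List.append_assoc]
      rw [← List.replicate_succ, ← List.replicate_succ']
    · have hy : ¬ (y = n - x) := by omega
      simp [h, ih, hy]

theorem get_addends_eq (n : Int) (pl : List Int) :
    get_addends n pl = get_addends_alt n pl := by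
  unfold get_addends get_addends_alt
  simp only [PySem.Dict.getD_foldl_insert_add_one, PySem.Dict.getD_empty, zero_add]
  apply PySem.List.foldl_congr_mem
  intro acc x _
  rw [inner_loop_eq_replicate]
  by_cases h : (pl.count (n - x) : Int) ≠ 0
  · simp [h, Int.toNat_natCast]
  · push_neg at h
    have : pl.count (n - x) = 0 := by exact_mod_cast h
    simp [this]

-- ===== VERDICT (by name: the statement is the Claim_ definition above) =====
theorem get_addends_spec : Claim_equal_get_addends := by
  intro n pl _
  exact get_addends_eq n pl
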